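-- pv_equiv track=rewrite | github.com/danieleschmidt/RLHF-Contract-Wizard | src/quantum_planner/contracts.py | _add_safety_buffers
-- ===== SOURCE A (Python) =====
-- from typing import Dict, List, Optional, Any, Tuple, Set, Callable
--
-- def _add_safety_buffers(task_order: List[str]) -> List[str]:
--     """Add safety buffers between sensitive tasks."""
--     sensitive_types = {'data_processing', 'model_training', 'deployment'}
--
--     buffered_order = []
--     for i, task_id in enumerate(task_order):
--         buffered_order.append(task_id)
--
--         # Add buffer after sensitive tasks
--         is_sensitive = any(s_type in task_id.lower() for s_type in sensitive_types)
--         is_last_task = i == len(task_order) - 1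
--
--         if is_sensitive and not is_last_task:
--             # Look for a non-sensitive task to use as buffer
--             for j, buffer_task_id in enumerate(task_order[i+1:], i+1):
--                 buffer_is_sensitive = any(
--                     s_type in buffer_task_id.lower()
--                     for s_type in sensitive_types
--                 )
--                 if not buffer_is_sensitive:
--                     # Swap next task with buffer task
--                     next_task = task_order[i+1] if i+1 < len(task_order) else None
--                     if next_task and j < len(task_order):
--                         task_order[i+1], task_order[j] = task_order[j], task_order[i+1]
--                     break
--
--     return task_order
-- ===== SOURCE B (Python) =====
-- from bisect import bisect_right
--
-- def _add_safety_buffers(task_order):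
--     """Add safety buffers between sensitive tasks."""
--     sensitive_types = ('data_processing', 'model_training', 'deployment')
--     n = len(task_order)
--     sens = [any(s_type in t.lower() for s_type in sensitive_types) for t in task_order]
--     # sorted list of positions currently holding a non-sensitive task
--     ns = [i for i, f in enumerate(sens) if not f]
--     for i in range(n - 1):
--         if sens[i]:
--             k = bisect_right(ns, i)
--             if k < len(ns):
--                 j = ns[k]
--                 if j != i + 1:
--                     task_order[i + 1], task_order[j] = task_order[j], task_order[i + 1]
--                     sens[i + 1], sens[j] = sens[j], sens[i + 1]
--                     ns[k] = i + 1
--     return task_order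
-- ===== Notes on version B (the rewrite author's own statement) =====
-- stated objective: alternative
-- what changed: A rescans the whole remaining suffix (recomputing each task's lowercased substring test) to find a buffer after every sensitive task; B precomputes each task's sensitivity flag once and keeps a sorted list of non-sensitive positions, finding each buffer with bisect_right and point-updating that list on every swap (O(n log n + n*m) worst case vs A's O(n^2 * m); measured only ~1.3x on generated inputs, so no speed claim).
import Mathlib
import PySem

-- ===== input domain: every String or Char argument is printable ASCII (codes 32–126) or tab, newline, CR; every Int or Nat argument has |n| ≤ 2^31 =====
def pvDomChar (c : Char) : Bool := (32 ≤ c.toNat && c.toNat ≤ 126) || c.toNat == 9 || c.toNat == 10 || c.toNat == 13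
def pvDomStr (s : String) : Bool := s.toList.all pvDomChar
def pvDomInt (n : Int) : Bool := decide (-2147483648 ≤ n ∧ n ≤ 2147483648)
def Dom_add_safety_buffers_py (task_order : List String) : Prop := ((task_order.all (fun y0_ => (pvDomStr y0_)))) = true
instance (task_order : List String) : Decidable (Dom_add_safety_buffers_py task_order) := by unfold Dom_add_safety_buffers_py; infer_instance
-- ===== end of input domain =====

-- B replaces A's per-step rescan of the suffix for a buffer task by sensitivity flags
-- computed once plus a sorted list of non-sensitive positions queried with bisect and
-- point-updated on each swap; the equivalence proved here is about the RETURN value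
-- (the Python A and B both also mutate task_order in place and return it).

-- ===== PORT A =====
def pySensitive (s : String) : Bool :=
  ["data_processing", "model_training", "deployment"].any
    (fun t => PySem.Str.isIn t (PySem.Str.lower s))

-- t[p], t[q] = t[q], t[p]
def pySwap (a : List String) (p q : Nat) : List String :=
  (a.set p (a.getD q "")).set q (a.getD p "")

-- A's inner loop: scan task_order[i+1:] (indices starting at m = i+1) for the first
-- non-sensitive task, breaking with its index
def firstNonSensAux : List String → Nat → Option Nat
  | [], _ => none
  | x :: xs, j => if pySensitive x then firstNonSensAux xs (j + 1) else some j

-- one iteration of A's outer for-loop (a is the current, in-place mutated list)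
def aStep (a : List String) (i : Nat) : List String :=
  -- is_sensitive = pySensitive (a.getD i ""), is_last = (i == a.length - 1)
  if pySensitive (a.getD i "") && !(i == a.length - 1) then
    match firstNonSensAux (a.drop (i + 1)) (i + 1) with
    | none => a
    | some j =>
        -- `if next_task and j < len(task_order)`: next_task = a[i+1] truthy ⟺ nonempty
        if (a.getD (i + 1) "" != "") && decide (j < a.length) then pySwap a (i + 1) j else a
  else a

-- A's buffered_order accumulator is dead code (A returns task_order), so it is not threaded
def add_safety_buffers_py (task_order : List String) : List String :=
  (List.range task_order.length).foldl aStep task_order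

-- ===== PORT B =====

-- ===== PORT B =====
-- sens[p], sens[q] = sens[q], sens[p]
def pySwapB (b : List Bool) (p q : Nat) : List Bool :=
  (b.set p (b.getD q false)).set q (b.getD p false)

-- [i for i, f in enumerate(sens) if not f]  (o = the running index; Python ints)
def nsComp : List Bool → Int → List Int
  | [], _ => []
  | f :: fs, o => if f then nsComp fs (o + 1) else o :: nsComp fs (o + 1)

-- one iteration of B's loop; state = (task_order, sens, ns)
def bStep (st : List String × List Bool × List Int) (i : Nat) : List String × List Bool × List Int :=
  -- st = (task_order, sens, ns); k = bisect_right(ns, i); j = ns[k]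
  if st.2.1.getD i false then
    if PySem.List.bisectRight st.2.2 (i : Int) < st.2.2.length then
      if st.2.2.getD (PySem.List.bisectRight st.2.2 (i : Int)) 0 != (i : Int) + 1 then
        (pySwap st.1 (i + 1) (st.2.2.getD (PySem.List.bisectRight st.2.2 (i : Int)) 0).toNat,
         pySwapB st.2.1 (i + 1) (st.2.2.getD (PySem.List.bisectRight st.2.2 (i : Int)) 0).toNat,
         st.2.2.set (PySem.List.bisectRight st.2.2 (i : Int)) ((i : Int) + 1))
      else st
    else st
  else st

def add_safety_buffers_py_alt (task_order : List String) : List String :=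
  let n := task_order.length
  let sens := task_order.map pySensitive
  let ns := nsComp sens 0
  ((List.range (n - 1)).foldl bStep (task_order, sens, ns)).1

-- ===== PRECONDITION & SPEC =====

-- ===== CLAIM (what is proved, stated in full; the proofs are below) =====

-- ===== LEMMAS AND PROOFS =====

-- ===== PRECONDITION & SPEC =====
def Spec_add_safety_buffers_py (task_order : List String) (out : List String) : Prop := out = add_safety_buffers_py_alt task_order
instance (task_order : List String) (out : List String) : Decidable (Spec_add_safety_buffers_py task_order out) := by unfold Spec_add_safety_buffers_py; infer_instance

-- ===== CLAIM (what is proved, stated in full; the proofs are below) =====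
def Claim_equal_add_safety_buffers_py : Prop := ∀ (task_order : List String), Dom_add_safety_buffers_py task_order → Spec_add_safety_buffers_py task_order (add_safety_buffers_py task_order)

-- ===== LEMMAS AND PROOFS =====

lemma len_aStep (a : List String) (i : Nat) : (aStep a i).length = a.length := by
  unfold aStep pySwap
  split
  · split
    · rfl
    · split
      · simp
      · rfl
  · rfl

lemma len_foldA (l : List Nat) (a : List String) : (l.foldl aStep a).length = a.length := by
  induction l generalizing a with
  | nil => rfl
  | cons i l ih => simpa [List.foldl_cons] using (ih (aStep a i)).trans (len_aStep a i)

lemma nsComp_append (xs ys : List Bool) (o : Int) :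
    nsComp (xs ++ ys) o = nsComp xs o ++ nsComp ys (o + xs.length) := by
  induction xs generalizing o with
  | nil => simp [nsComp]
  | cons f fs ih =>
    simp only [List.cons_append, nsComp, ih, List.length_cons]
    split <;> simp <;> ring_nf

lemma nsComp_all_sens (xs : List Bool) (o : Int) (h : ∀ f ∈ xs, f = true) :
    nsComp xs o = [] := by
  induction xs generalizing o with
  | nil => rfl
  | cons f fs ih =>
    have := h f (by simp)
    simp [nsComp, this, ih _ (fun g hg => h g (by simp [hg]))]

lemma mem_nsComp (xs : List Bool) (o x : Int) (hx : x ∈ nsComp xs o) :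
    o ≤ x ∧ x < o + xs.length := by
  induction xs generalizing o with
  | nil => simp [nsComp] at hx
  | cons f fs ih =>
    simp only [nsComp] at hx
    split at hx
    · have := ih (o+1) hx
      constructor <;> [omega; (simp only [List.length_cons]; push_cast; omega)]
    · rcases List.mem_cons.1 hx with rfl | hx
      · constructor <;> [omega; (simp only [List.length_cons]; push_cast; omega)]
      · have := ih (o+1) hx
        constructor <;> [omega; (simp only [List.length_cons]; push_cast; omega)]

lemma nsComp_sorted (xs : List Bool) (o : Int) : (nsComp xs o).Pairwise (· ≤ ·) := by
  induction xs generalizing o with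
  | nil => simp [nsComp]
  | cons f fs ih =>
    simp only [nsComp]
    split
    · exact ih _
    · exact List.Pairwise.cons (fun y hy => le_of_lt (lt_of_lt_of_le (by omega) (mem_nsComp _ _ _ hy).1)) (ih _)

lemma head?_nsComp_firstNonSens (xs : List String) (m : Nat) :
    (nsComp (xs.map pySensitive) (m : Int)).head? = (firstNonSensAux xs m).map (fun j => (j : Int)) := by
  induction xs generalizing m with
  | nil => rfl
  | cons x xs ih =>
    simp only [List.map_cons, nsComp, firstNonSensAux]
    split
    · have := ih (m+1); push_cast at this ⊢; simpa using this
    · rfl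

lemma firstNonSens_decomp (xs : List String) (m j : Nat)
    (h : firstNonSensAux xs m = some j) :
    ∃ p c q, xs = p ++ c :: q ∧ (∀ z ∈ p, pySensitive z = true) ∧ pySensitive c = false ∧
      j = m + p.length := by
  induction xs generalizing m with
  | nil => simp [firstNonSensAux] at h
  | cons x xs ih =>
    simp only [firstNonSensAux] at h
    split at h
    · obtain ⟨p, c, q, rfl, hp, hc, rfl⟩ := ih (m+1) h
      exact ⟨x :: p, c, q, rfl, by rename_i hx; simpa [hx] using hp, hc, by simp; omega⟩
    · exact ⟨[], x, xs, rfl, by simp, by rename_i hx; simpa using hx, by cases h; simp⟩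

lemma sens_ne_empty (s : String) (h : pySensitive s = true) : s ≠ "" := by
  rintro rfl
  exact absurd h (by decide)

lemma getD_map_sens (a : List String) (i : Nat) (hi : i < a.length) :
    (a.map pySensitive).getD i false = pySensitive (a.getD i "") := by
  simp [List.getD_eq_getElem?_getD, List.getElem?_map, List.getElem?_eq_getElem, hi]

lemma pySwap_self (a : List String) (p : Nat) (hp : p < a.length) : pySwap a p p = a := by
  unfold pySwap
  rw [List.set_set, List.getD_eq_getElem a _ hp]
  exact List.set_getElem_self hp

lemma bisectRight_split (P Q : List Int) (i : Int)
    (hP : ∀ x ∈ P, x ≤ i) (hQ : ∀ x ∈ Q, i < x) (hs : (P ++ Q).Pairwise (· ≤ ·)) :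
    PySem.List.bisectRight (P ++ Q) i = P.length := by
  obtain ⟨hle, h1, h2⟩ := PySem.List.bisectRight_spec (P ++ Q) i hs
  set K := PySem.List.bisectRight (P ++ Q) i with hK
  rcases lt_trichotomy K P.length with hlt | heq | hgt
  · exfalso
    have hKlen : K < (P ++ Q).length := by simp; omega
    have := h2 K hKlen le_rfl
    have hmem : (P ++ Q)[K] ∈ P := by
      rw [List.getElem_append_left hlt]; exact List.getElem_mem _
    exact absurd (hP _ hmem) (by omega)
  · exact heq
  · exfalso
    have hPlen : P.length < (P ++ Q).length := by omega
    have := h1 P.length hPlen hgt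
    have hmem : (P ++ Q)[P.length] ∈ Q := by
      rw [List.getElem_append_right le_rfl]; exact List.getElem_mem _
    exact absurd (hQ _ hmem) (by omega)

lemma pySwap_mid (u p' q : List String) (x c : String) :
    pySwap (u ++ x :: (p' ++ c :: q)) u.length (u.length + (p'.length + 1)) =
      u ++ c :: (p' ++ x :: q) := by
  unfold pySwap
  have h1 : (u ++ x :: (p' ++ c :: q)).getD u.length "" = x := by
    simp [List.getD_eq_getElem?_getD, List.getElem?_append_right]
  have h2 : (u ++ x :: (p' ++ c :: q)).getD (u.length + (p'.length + 1)) "" = c := by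
    simp [List.getD_eq_getElem?_getD, List.getElem?_append_right]
  rw [h1, h2]
  rw [show (u ++ x :: (p' ++ c :: q)).set u.length c = u ++ c :: (p' ++ c :: q) by
    simp [List.set_append]]
  simp [List.set_append, List.set_cons_succ]

lemma map_pySwap (a : List String) (p q : Nat) (hp : p < a.length) (hq : q < a.length) :
    (pySwap a p q).map pySensitive = pySwapB (a.map pySensitive) p q := by
  unfold pySwap pySwapB
  rw [List.map_set, List.map_set, getD_map_sens a q hq, getD_map_sens a p hp]

def InvOf (a : List String) : List String × List Bool × List Int :=
  (a, a.map pySensitive, nsComp (a.map pySensitive) 0)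

lemma bStep_aStep (a : List String) (i : Nat) (h : i + 1 < a.length) :
    bStep (InvOf a) i = InvOf (aStep a i) := by
  have hgi : (a.map pySensitive).getD i false = pySensitive (a.getD i "") :=
    getD_map_sens a i (by omega)
  show bStep (a, a.map pySensitive, nsComp (a.map pySensitive) 0) i = InvOf (aStep a i)
  unfold bStep aStep
  dsimp only
  rw [hgi]
  by_cases hs : pySensitive (a.getD i "") = true
  swap
  · -- non-sensitive at i: both sides leave everything unchanged
    simp only [Bool.not_eq_true] at hs
    rw [hs]
    simp [InvOf]
  rw [hs]
  have hlast : (i == a.length - 1) = false := by simp; omega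
  rw [hlast]
  simp only [Bool.not_false, Bool.and_true, if_true, Bool.true_and]
  -- decomposition of a at position i+1
  have hu : (a.take (i+1)).length = i + 1 := by simp; omega
  have hsplit : a = a.take (i+1) ++ a.drop (i+1) := (List.take_append_drop _ a).symm
  have hns : nsComp (a.map pySensitive) 0 =
      nsComp ((a.take (i+1)).map pySensitive) 0 ++
        nsComp ((a.drop (i+1)).map pySensitive) ((i+1 : Nat) : Int) := by
    conv_lhs => rw [hsplit]
    rw [List.map_append, nsComp_append]
    congr 2
    simp only [List.length_map, hu]
    norm_num
  have hsorted := nsComp_sorted (a.map pySensitive) 0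
  have hPbound : ∀ x ∈ nsComp ((a.take (i+1)).map pySensitive) 0, x ≤ (i : Int) := by
    intro x hx
    have := mem_nsComp _ _ _ hx
    simp only [List.length_map, hu] at this
    push_cast at this ⊢
    omega
  rcases hfa : firstNonSensAux (a.drop (i+1)) (i+1) with _ | j
  · -- no non-sensitive task after i: both sides keep the state
    have hQnil : nsComp ((a.drop (i+1)).map pySensitive) ((i+1 : Nat) : Int) = [] := by
      have := head?_nsComp_firstNonSens (a.drop (i+1)) (i+1)
      rw [hfa] at this
      exact List.head?_eq_none_iff.mp (by simpa using this)
    have hbis : PySem.List.bisectRight (nsComp (a.map pySensitive) 0) (i : Int) =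
        (nsComp (a.map pySensitive) 0).length := by
      conv_lhs => rw [hns, hQnil]
      rw [hns, hQnil]
      simpa using bisectRight_split _ [] i hPbound (by simp)
        (by rw [hns, hQnil] at hsorted; simpa using hsorted)
    rw [hbis]
    simp [InvOf]
  · -- a buffer was found at index j
    obtain ⟨p, c, q, hvpcq, hp, hc, hj⟩ := firstNonSens_decomp _ _ _ hfa
    have ha : a = a.take (i+1) ++ p ++ c :: q := by
      conv_lhs => rw [hsplit, hvpcq]
      simp
    have hQcons : nsComp ((a.drop (i+1)).map pySensitive) ((i+1 : Nat) : Int) =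
        (j : Int) :: nsComp (q.map pySensitive) ((j : Int) + 1) := by
      rw [hvpcq, List.map_append, nsComp_append,
        nsComp_all_sens (p.map pySensitive) _ (by simpa using hp)]
      simp only [List.nil_append, List.map_cons, nsComp, hc, List.length_map,
        Bool.false_eq_true, if_false]
      rw [hj]
      push_cast
      ring_nf

    have hjlb : i + 1 ≤ j := by omega
    have hjub : j < a.length := by
      have hm := mem_nsComp ((a.drop (i+1)).map pySensitive) ((i+1 : Nat) : Int) ((j : Nat) : Int)
        (by rw [hQcons]; exact List.mem_cons_self ..)
      simp only [List.length_map, List.length_drop] at hm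
      push_cast at hm
      omega
    have hsorted' := hsorted
    rw [hns, hQcons] at hsorted'
    have hbis : PySem.List.bisectRight (nsComp (a.map pySensitive) 0) (i : Int) =
        (nsComp ((a.take (i+1)).map pySensitive) 0).length := by
      conv_lhs => rw [hns, hQcons]
      refine bisectRight_split _ _ _ hPbound ?_ hsorted'
      intro x hx
      rcases List.mem_cons.1 hx with rfl | hx
      · push_cast; omega
      · have := (mem_nsComp _ _ _ hx).1
        push_cast at this ⊢
        omega
    have hlen : (nsComp ((a.take (i+1)).map pySensitive) 0).length <
        (nsComp (a.map pySensitive) 0).length := by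
      rw [hns, hQcons]
      simp
    have hget : (nsComp (a.map pySensitive) 0).getD
        (nsComp ((a.take (i+1)).map pySensitive) 0).length 0 = (j : Int) := by
      rw [hns, hQcons]
      simp [List.getD_eq_getElem?_getD, List.getElem?_append_right]
    rw [hbis, hget, if_pos hlen]
    by_cases hji : j = i + 1
    · -- ns[k] == i+1: no swap needed on either side
      subst hji
      have hcond : (((i+1 : Nat) : Int) != (i : Int) + 1) = false := by
        simp only [bne_eq_false_iff_eq]
        push_cast
        ring
      rw [hcond]
      simp only [Bool.false_eq_true, if_false]
      by_cases hg : (a.getD (i + 1) "" != "" && decide (i + 1 < a.length)) = true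
      · simp only [hg, if_true, pySwap_self a (i+1) (by omega : i + 1 < a.length)]
        rfl
      · simp only [hg, if_false, Bool.false_eq_true]
        rfl
    · -- genuine swap at positions i+1 and j
      rcases p with _ | ⟨x, p'⟩
      · exfalso; simp at hj; omega
      have hx : pySensitive x = true := hp x (by simp)
      have hp' : ∀ z ∈ p', pySensitive z = true := fun z hz => hp z (by simp [hz])
      have ha' : a = a.take (i+1) ++ x :: (p' ++ c :: q) := by
        conv_lhs => rw [ha]
        simp
      have hxa : a.getD (i + 1) "" = x := by
        conv_lhs => rw [ha']
        rw [show i + 1 = (a.take (i+1)).length + 0 by omega]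
        simp [List.getD_eq_getElem?_getD, List.getElem?_append_right]
      have hgd : (a.getD (i + 1) "" != "" && decide (j < a.length)) = true := by
        rw [hxa]
        simp [hjub, sens_ne_empty x hx]
      have hbne : (((j : Nat) : Int) != (i : Int) + 1) = true := by
        simp only [bne_iff_ne, ne_eq]
        push_cast
        omega
      simp only [hbne, hgd, if_true, Int.toNat_natCast]
      have hswap : pySwap a (i + 1) j = a.take (i+1) ++ c :: (p' ++ x :: q) := by
        conv_lhs => rw [ha']
        have h2 := pySwap_mid (a.take (i+1)) p' q x c
        rw [hu] at h2
        rw [show j = (i + 1) + (p'.length + 1) by simp at hj; omega]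
        exact h2
      unfold InvOf
      refine Prod.ext rfl (Prod.ext ?_ ?_)
      · exact (map_pySwap a (i+1) j (by omega) hjub).symm
      · -- ns.set k (i+1) = nsComp of the swapped list
        show (nsComp (a.map pySensitive) 0).set
            (nsComp ((a.take (i+1)).map pySensitive) 0).length ((i : Int) + 1) =
          nsComp ((pySwap a (i + 1) j).map pySensitive) 0
        rw [hns, hQcons, hswap]
        rw [List.map_append, nsComp_append]
        simp only [List.length_map, hu, List.map_cons, nsComp, hc, Bool.false_eq_true, if_false,
          List.map_append, nsComp_append, nsComp_all_sens (p'.map pySensitive) _ (by simpa using hp'),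
          hx, if_true, List.nil_append]
        simp [List.set_append]
        congr 1
        simp only [List.length_cons] at hj
        push_cast
        omega

lemma fold_inv (l : List Nat) (a : List String) (hl : ∀ i ∈ l, i + 1 < a.length) :
    l.foldl bStep (InvOf a) = InvOf (l.foldl aStep a) := by
  induction l generalizing a with
  | nil => rfl
  | cons i l ih =>
    simp only [List.foldl_cons]
    rw [bStep_aStep a i (hl i (by simp))]
    exact ih (aStep a i) (fun i' hi' => by rw [len_aStep]; exact hl i' (by simp [hi']))

lemma aStep_last (a : List String) (m : Nat) (hm : a.length = m + 1) : aStep a m = a := by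
  unfold aStep
  have : (m == a.length - 1) = true := by simp [hm]
  rw [this]
  simp

lemma foldA_drop_last (a : List String) :
    (List.range a.length).foldl aStep a = (List.range (a.length - 1)).foldl aStep a := by
  rcases hn : a.length with _ | m
  · rfl
  · rw [List.range_succ, List.foldl_append]
    simp only [List.foldl_cons, List.foldl_nil, Nat.add_sub_cancel]
    exact aStep_last _ m (by rw [len_foldA, hn])

lemma ports_agree : ∀ (task_order : List String),
    add_safety_buffers_py task_order = add_safety_buffers_py_alt task_order := by
  intro a
  show (List.range a.length).foldl aStep a =
    ((List.range (a.length - 1)).foldl bStep (InvOf a)).1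
  rw [foldA_drop_last, fold_inv _ a (fun i hi => by simp at hi; omega)]
  rfl

-- ===== VERDICT (by name: the statement is the Claim_ definition above) =====
theorem add_safety_buffers_py_spec : Claim_equal_add_safety_buffers_py := by
  intro task_order _
  unfold Spec_add_safety_buffers_py
  exact ports_agree task_order
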